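-- pv_equiv track=rewrite | github.com/EarlPaquibol/Phyton | Exercises/Artur.py | invite_more_women
-- ===== SOURCE A (Python) =====
-- def invite_more_women(attendees):
--     men = 0
--     women = 0
--     for sex in attendees:
--         if sex == -1:
--             women += 1
--         else:
--             men += 1
--     if men > women:
--         return True
--     else:
--         return False
-- ===== SOURCE B (Python) =====
-- def invite_more_women(attendees):
--     # Pair-cancellation: each man cancels a pending woman and vice versa;
--     # the survivors on the stack are all of the majority gender.
--     stack = []
--     for sex in attendees:
--         g = -1 if sex == -1 else 1
--         if stack and stack[-1] != g:
--             stack.pop()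
--         else:
--             stack.append(g)
--     return bool(stack) and stack[-1] == 1
-- ===== Notes on version B (the rewrite author's own statement) =====
-- stated objective: alternative
-- what changed: Replaced the two-counter tally-and-compare with a stack-based pair-cancellation: opposite genders cancel in pairs, so the surviving stack holds only the majority gender and the answer is read off its top.
import Mathlib
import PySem

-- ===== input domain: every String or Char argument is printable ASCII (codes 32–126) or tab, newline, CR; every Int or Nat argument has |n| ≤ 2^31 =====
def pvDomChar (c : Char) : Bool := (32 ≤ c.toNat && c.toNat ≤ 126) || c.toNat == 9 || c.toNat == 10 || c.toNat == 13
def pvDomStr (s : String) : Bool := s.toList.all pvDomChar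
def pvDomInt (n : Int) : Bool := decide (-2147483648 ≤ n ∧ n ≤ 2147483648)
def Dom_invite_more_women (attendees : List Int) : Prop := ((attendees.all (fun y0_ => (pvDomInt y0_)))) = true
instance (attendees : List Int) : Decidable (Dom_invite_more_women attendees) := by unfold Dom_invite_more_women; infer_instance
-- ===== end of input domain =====

-- B replaces A's two-counter tally with a stack-based pair-cancellation (opposite genders cancel; the survivors are the majority) — an alternative algorithm, same cost.


-- ===== PORT A =====
def invite_more_women (attendees : List Int) : Bool :=
  let st := attendees.foldl (fun (mw : Int × Int) sex =>
    if sex == -1 then (mw.1, mw.2 + 1) else (mw.1 + 1, mw.2)) (0, 0)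
  if st.1 > st.2 then true else false

-- ===== PORT B =====
-- stack is pushed/popped at the head (Python's list end); bool(stack) and stack[-1] == 1
def pvCancelStep (st : List Int) (sex : Int) : List Int :=
  let g : Int := if sex == -1 then -1 else 1
  match st with
  | [] => [g]
  | t :: rest => if t != g then rest else g :: t :: rest

def invite_more_women_alt (attendees : List Int) : Bool :=
  match attendees.foldl pvCancelStep [] with
  | [] => false
  | t :: _ => t == 1

-- ===== PRECONDITION & SPEC =====
def Spec_invite_more_women (attendees : List Int) (out : Bool) : Prop := out = invite_more_women_alt attendees
instance (attendees : List Int) (out : Bool) : Decidable (Spec_invite_more_women attendees out) := by unfold Spec_invite_more_women; infer_instance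

-- ===== CLAIM (what is proved, stated in full; the proofs are below) =====
def Claim_equal_invite_more_women : Prop := ∀ (attendees : List Int), Dom_invite_more_women attendees → Spec_invite_more_women attendees (invite_more_women attendees)

-- ===== LEMMAS AND PROOFS =====

-- the stack after a balanced prefix: encode b = the homogeneous stack for signed balance b (men − women)
def pvEncode (b : Int) : List Int :=
  if 0 ≤ b then List.replicate b.toNat 1 else List.replicate (-b).toNat (-1)

lemma pvEncode_neg (b : Int) (k : Nat) (h : -b = 1 + k) :
    pvEncode b = (-1) :: List.replicate k (-1) := by
  unfold pvEncode
  rw [if_neg (by omega)]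
  simp [show (-b).toNat = k + 1 from by omega, List.replicate_succ]

lemma pvEncode_pos (b : Int) (k : Nat) (h : b = 1 + k) :
    pvEncode b = 1 :: List.replicate k 1 := by
  unfold pvEncode
  rw [if_pos (by omega)]
  simp [show b.toNat = k + 1 from by omega, List.replicate_succ]

lemma pvCancelStep_encode (b : Int) (sex : Int) :
    pvCancelStep (pvEncode b) sex = pvEncode (b + (if sex == -1 then -1 else 1)) := by
  by_cases hs : sex = -1
  · rcases lt_trichotomy b 0 with hb | hb | hb
    · obtain ⟨k, hk⟩ := Int.le.dest (by omega : (1:Int) ≤ -b)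
      rw [pvEncode_neg b k (by omega), pvEncode_neg _ (k+1) (by simp [hs]; omega)]
      simp [pvCancelStep, hs, List.replicate_succ]
    · subst hb
      rw [show pvEncode 0 = [] from rfl, pvEncode_neg _ 0 (by simp [hs])]
      simp [pvCancelStep, hs]
    · obtain ⟨k, hk⟩ := Int.le.dest (by omega : (1:Int) ≤ b)
      rw [pvEncode_pos b k (by omega)]
      by_cases h0 : k = 0
      · subst h0
        rw [show b + (if sex == -1 then -1 else 1) = 0 from by simp [hs]; omega]
        simp [pvCancelStep, hs, pvEncode]
      · obtain ⟨j, hj⟩ := Nat.exists_eq_succ_of_ne_zero h0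
        subst hj
        rw [pvEncode_pos _ j (by simp [hs]; omega)]
        simp [pvCancelStep, hs, List.replicate_succ]
  · rcases lt_trichotomy b 0 with hb | hb | hb
    · obtain ⟨k, hk⟩ := Int.le.dest (by omega : (1:Int) ≤ -b)
      rw [pvEncode_neg b k (by omega)]
      by_cases h0 : k = 0
      · subst h0
        rw [show b + (if sex == -1 then -1 else 1) = 0 from by simp [hs]; omega]
        simp [pvCancelStep, hs, pvEncode]
      · obtain ⟨j, hj⟩ := Nat.exists_eq_succ_of_ne_zero h0
        subst hj
        rw [pvEncode_neg _ j (by simp [hs]; omega)]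
        simp [pvCancelStep, hs, List.replicate_succ]
    · subst hb
      rw [show pvEncode 0 = [] from rfl, pvEncode_pos _ 0 (by simp [hs])]
      simp [pvCancelStep, hs]
    · obtain ⟨k, hk⟩ := Int.le.dest (by omega : (1:Int) ≤ b)
      rw [pvEncode_pos b k (by omega), pvEncode_pos _ (k+1) (by simp [hs]; omega)]
      simp [pvCancelStep, hs, List.replicate_succ]

lemma foldl_cancel (attendees : List Int) (b : Int) :
    attendees.foldl pvCancelStep (pvEncode b)
      = pvEncode (b + ((attendees.length : Int) - 2 * attendees.count (-1))) := by
  induction attendees generalizing b with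
  | nil => simp
  | cons x xs ih =>
      rw [List.foldl_cons, pvCancelStep_encode, ih]
      congr 1
      by_cases h : x = -1 <;> simp [h, List.count_cons] <;> push_cast <;> ring

lemma foldl_tally (attendees : List Int) (m w : Int) :
    attendees.foldl (fun (mw : Int × Int) sex =>
      if sex == -1 then (mw.1, mw.2 + 1) else (mw.1 + 1, mw.2)) (m, w)
    = (m + ((attendees.length : Int) - attendees.count (-1)),
       w + (attendees.count (-1) : Int)) := by
  induction attendees generalizing m w with
  | nil => simp
  | cons x xs ih =>
      simp only [List.foldl_cons, List.length_cons]
      by_cases h : x = -1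
      · rw [if_pos (by simp [h]), ih]
        refine Prod.ext ?_ ?_ <;> simp [h] <;> omega
      · rw [if_neg (by simp [h]), ih]
        refine Prod.ext ?_ ?_ <;> simp [h] <;> push_cast <;> omega

-- ===== VERDICT (by name: the statement is the Claim_ definition above) =====
theorem invite_more_women_spec : Claim_equal_invite_more_women := by
  intro attendees _
  unfold Spec_invite_more_women invite_more_women invite_more_women_alt
  have h0 : (List.nil : List Int) = pvEncode 0 := rfl
  rw [foldl_tally, h0, foldl_cancel]
  have hc : (attendees.count (-1) : Int) ≤ (attendees.length : Int) := by
    exact_mod_cast List.count_le_length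
  set c : Int := (attendees.count (-1) : Int) with hcdef
  set n : Int := (attendees.length : Int) with hndef
  simp only [zero_add, gt_iff_lt]
  by_cases h : c < n - c
  · rw [if_pos h]
    obtain ⟨k, hk⟩ := Int.le.dest (by omega : (1:Int) ≤ n - 2 * c)
    rw [pvEncode_pos _ k (by omega)]
    simp
  · rw [if_neg h]
    rcases lt_trichotomy (n - 2 * c) 0 with hb | hb | hb
    · obtain ⟨k, hk⟩ := Int.le.dest (by omega : (1:Int) ≤ -(n - 2 * c))
      rw [pvEncode_neg _ k (by omega)]
      simp
    · rw [hb, show pvEncode 0 = [] from rfl]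
    · omega
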